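-- pv_equiv track=rewrite | github.com/HelloSSIFI/HelloWorld | programmers/2022_코딩테스트_실전_대비_모의고사/s2_hyg4779.py | solution
-- ===== SOURCE A (Python) =====
-- from collections import defaultdict
--
-- def solution(want, number, discount):
--     fruits = defaultdict(int)
--     ans = 0
--     for w, n in zip(want, number):
--         fruits[w] = n
--
--     for f in discount[:10]:
--         fruits[f] -= 1
--
--     idx = 0
--
--     for k in want:
--         if fruits[k] > 0:break
--     else:
--         ans += 1
--
--     while idx+10 < len(discount):
--         fruits[discount[idx]] += 1
--         fruits[discount[idx+10]] -= 1
--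
--         idx += 1
--
--         for k in want:
--             if fruits[k] > 0:break
--         else:
--             ans += 1
--
--     return ans
-- ===== SOURCE B (Python) =====
-- def solution(want, number, discount):
--     # Sliding window over discount maintaining a count of unsatisfied want-items,
--     # updated only on threshold crossings (O(len(discount) + len(want))).
--     need = {}
--     for w, n in zip(want, number):
--         need[w] = n
--     cnt = {}
--     for f in discount[:10]:
--         cnt[f] = cnt.get(f, 0) + 1
--     unsat = sum(1 for k, v in need.items() if cnt.get(k, 0) < v)
--     ans = 1 if unsat == 0 else 0
--     for i in range(len(discount) - 10):
--         for k, d in ((discount[i], -1), (discount[i + 10], 1)):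
--             c = cnt.get(k, 0)
--             if k in need:
--                 if d < 0:
--                     if c == need[k]:
--                         unsat += 1
--                 else:
--                     if c + 1 == need[k]:
--                         unsat -= 1
--             cnt[k] = c + d
--         if unsat == 0:
--             ans += 1
--     return ans
-- ===== Notes on version B (the rewrite author's own statement) =====
-- stated objective: faster
-- what changed: A rescans every wanted fruit for each of the ~len(discount) windows; B slides the window once, keeping a counter of window contents and a single count of unsatisfied want-items that is updated only when a fruit's window count crosses its wanted threshold.
import Mathlib
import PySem

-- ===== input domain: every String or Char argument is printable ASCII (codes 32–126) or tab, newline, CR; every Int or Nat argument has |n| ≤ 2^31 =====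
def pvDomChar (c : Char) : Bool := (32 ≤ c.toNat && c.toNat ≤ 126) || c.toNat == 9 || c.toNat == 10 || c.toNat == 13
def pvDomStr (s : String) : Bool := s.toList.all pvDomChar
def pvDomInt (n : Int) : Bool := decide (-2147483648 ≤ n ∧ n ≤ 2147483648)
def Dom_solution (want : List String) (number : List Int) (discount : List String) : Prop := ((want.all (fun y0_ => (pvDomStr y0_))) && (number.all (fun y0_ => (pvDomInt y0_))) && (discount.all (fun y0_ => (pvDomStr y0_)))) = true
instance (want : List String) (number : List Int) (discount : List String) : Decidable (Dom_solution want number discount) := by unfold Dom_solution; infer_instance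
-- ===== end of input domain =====

-- B replaces A's per-window re-scan of `want` by a sliding count of unsatisfied want-items,
-- updated only on threshold crossings (objective: faster).

-- ===== PORT A =====
-- body of `while idx+10 < len(discount)`: idx takes exactly the values 0, 1, …, len-11
def solutionWhileStep (want : List String) (discount : List String)
    (st : PySem.Dict String Int × Int) (idx : Nat) : PySem.Dict String Int × Int :=
  -- discount[idx] / discount[idx+10]: both indices are in range here, so getD's default is never used
  let d1 := st.1.modify (discount.getD idx "") 0 (fun v => v + 1)
  let d2 := d1.modify (discount.getD (idx + 10) "") 0 (fun v => v - 1)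
  -- for k in want: if fruits[k] > 0: break / else: ans += 1
  (d2, if want.all (fun k => !decide (d2.getD k 0 > 0)) then st.2 + 1 else st.2)

def solution (want : List String) (number : List Int) (discount : List String) : Int :=
  -- fruits = defaultdict(int); for w, n in zip(want, number): fruits[w] = n
  let fruits : PySem.Dict String Int :=
    (want.zip number).foldl (fun d wn => d.insert wn.1 wn.2) PySem.Dict.empty
  -- for f in discount[:10]: fruits[f] -= 1
  let fruits :=
    (PySem.List.slice discount none (some 10)).foldl
      (fun d f => d.modify f 0 (fun v => v - 1)) fruits
  -- ans = 0; for k in want: if fruits[k] > 0: break / else: ans += 1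
  let ans : Int := if want.all (fun k => !decide (fruits.getD k 0 > 0)) then 1 else 0
  let st := (List.range (discount.length - 10)).foldl (solutionWhileStep want discount) (fruits, ans)
  st.2

-- ===== PORT B =====
-- inner `for k, d in ((discount[i], -1), (discount[i+10], 1))` body: state = (cnt, unsat)
def solutionAltShift (need : PySem.Dict String Int)
    (cu : PySem.Dict String Int × Int) (kd : String × Int) : PySem.Dict String Int × Int :=
  let c := cu.1.getD kd.1 0
  let u :=
    if need.contains kd.1 then
      if kd.2 < 0 then
        if c = need.getD kd.1 0 then cu.2 + 1 else cu.2
      else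
        if c + 1 = need.getD kd.1 0 then cu.2 - 1 else cu.2
    else cu.2
  (cu.1.insert kd.1 (c + kd.2), u)

-- body of `for i in range(len(discount) - 10)`: state = ((cnt, unsat), ans)
def solutionAltStep (need : PySem.Dict String Int) (discount : List String)
    (st : (PySem.Dict String Int × Int) × Int) (i : Nat) : (PySem.Dict String Int × Int) × Int :=
  -- discount[i] / discount[i+10]: both indices in range here, so getD's default is never used
  let cu := [(discount.getD i "", (-1 : Int)), (discount.getD (i + 10) "", (1 : Int))].foldl
      (solutionAltShift need) st.1
  (cu, if cu.2 = 0 then st.2 + 1 else st.2)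

def solution_alt (want : List String) (number : List Int) (discount : List String) : Int :=
  let need : PySem.Dict String Int :=
    (want.zip number).foldl (fun d wn => d.insert wn.1 wn.2) PySem.Dict.empty
  let cnt : PySem.Dict String Int :=
    (PySem.List.slice discount none (some 10)).foldl
      (fun d f => d.insert f (d.getD f 0 + 1)) PySem.Dict.empty
  let unsat : Int :=
    need.items.foldl (fun a kv => if cnt.getD kv.1 0 < kv.2 then a + 1 else a) 0
  let ans : Int := if unsat = 0 then 1 else 0
  let st := (List.range (discount.length - 10)).foldl (solutionAltStep need discount) ((cnt, unsat), ans)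
  st.2

-- ===== PRECONDITION & SPEC =====
def Spec_solution (want : List String) (number : List Int) (discount : List String) (out : Int) : Prop := out = solution_alt want number discount
instance (want : List String) (number : List Int) (discount : List String) (out : Int) : Decidable (Spec_solution want number discount out) := by unfold Spec_solution; infer_instance

-- ===== CLAIM (what is proved, stated in full; the proofs are below) =====
def Claim_equal_solution : Prop := ∀ (want : List String) (number : List Int) (discount : List String), Dom_solution want number discount → Spec_solution want number discount (solution want number discount)

-- ===== LEMMAS AND PROOFS =====

-- count of k in the window discount[t:t+10], as an Int
def winCnt (discount : List String) (t : Nat) (k : String) : Int :=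
  (((discount.drop t).take 10).count k : Int)

def needOf (want : List String) (number : List Int) : PySem.Dict String Int :=
  (want.zip number).foldl (fun d wn => d.insert wn.1 wn.2) PySem.Dict.empty

lemma winCnt_nonneg (discount : List String) (t : Nat) (k : String) : 0 ≤ winCnt discount t k := by
  exact Int.natCast_nonneg _

lemma needOf_keys_nodup (want : List String) (number : List Int) : (needOf want number).keys.Nodup := by
  exact PySem.Dict.nodup_keys_foldl_insert_key _ _ _ _ PySem.Dict.nodup_keys_empty

lemma needOf_keys_sub (want : List String) (number : List Int) :
    ∀ k ∈ (needOf want number).keys, k ∈ want := by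
  intro k hk
  unfold needOf at hk
  rw [PySem.Dict.keys_foldl_insert_key (want.zip number) Prod.fst (fun _ wn => wn.2)] at hk
  simp only [PySem.Dict.keys_empty, PySem.Set.update_nil_left, PySem.Set.mem_ofList] at hk
  obtain ⟨p, hp, rfl⟩ := List.mem_map.mp hk
  exact (List.of_mem_zip hp).1

lemma getD_foldl_modify_sub_one (l : List String) (d : PySem.Dict String Int) (k : String) :
    (l.foldl (fun d f => d.modify f 0 (fun v => v - 1)) d).getD k 0
      = d.getD k 0 - (l.count k : Int) := by
  induction l generalizing d with
  | nil => simp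
  | cons a l ih =>
    simp only [List.foldl_cons, ih, PySem.Dict.getD_modify, List.count_cons, beq_iff_eq]
    by_cases h : k = a
    · subst h; simp; omega
    · rw [if_neg h, if_neg (fun ha => h ha.symm), Nat.add_zero]

lemma window_shift (l : List String) (i w : Nat) (h : i + w < l.length) (k : String) :
    (((l.drop (i + 1)).take w).count k : Int)
      = (((l.drop i).take w).count k : Int)
        - (if k = l.getD i "" then 1 else 0) + (if k = l.getD (i + w) "" then 1 else 0) := by
  have hi : i < l.length := by omega
  cases w with
  | zero =>
    simp only [List.take_zero, List.count_nil, Nat.add_zero, Nat.cast_zero]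
    split_ifs <;> omega
  | succ w =>
    have h3 : (l.drop (i + 1))[w]? = some (l.getD (i + w + 1) "") := by
      rw [List.getElem?_drop, show i + 1 + w = i + w + 1 from by omega,
        List.getElem?_eq_getElem (show i + w + 1 < l.length from by omega),
        List.getD_eq_getElem l "" (by omega)]
    rw [List.drop_eq_getElem_cons hi, List.take_succ_cons, List.take_add_one, h3]
    rw [List.getD_eq_getElem l "" hi]
    simp only [List.count_cons, List.count_append, Option.toList_some, beq_iff_eq]
    rw [show i + (w + 1) = i + w + 1 from by omega]
    by_cases hk1 : k = l[i]'hi <;> by_cases hk2 : k = l.getD (i + w + 1) "" <;>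
      simp [hk1, hk2, eq_comm]

lemma winCnt_succ (discount : List String) (t : Nat) (h : t + 10 < discount.length) (k : String) :
    winCnt discount (t + 1) k =
      winCnt discount t k - (if k = discount.getD t "" then 1 else 0)
        + (if k = discount.getD (t + 10) "" then 1 else 0) :=
  window_shift discount t 10 h k

-- B's initial unsat loop is a countP
lemma foldl_unsat_eq_countP (l : List (String × Int)) (g : String → Int) (a : Int) :
    (l.foldl (fun a kv => if g kv.1 < kv.2 then a + 1 else a) a)
      = a + (l.countP (fun kv => decide (g kv.1 < kv.2)) : Int) := by
  induction l generalizing a with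
  | nil => simp
  | cons kv l ih =>
    simp only [List.foldl_cons, List.countP_cons, ih, decide_eq_true_eq]
    split_ifs with h <;> push_cast <;> omega

-- countP over an association list with distinct keys: changing the predicate only at key k0
lemma countP_delta (l : List (String × Int)) (hnd : (l.map Prod.fst).Nodup)
    (p q : String × Int → Bool) (k0 : String)
    (hag : ∀ kv : String × Int, kv.1 ≠ k0 → p kv = q kv) :
    (l.countP q : Int) = (l.countP p : Int) +
      (match (PySem.Dict.mk l).get? k0 with
       | some v => (if q (k0, v) then 1 else 0) - (if p (k0, v) then 1 else 0)
       | none => 0) := by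
  induction l with
  | nil => simp [PySem.Dict.get?]
  | cons kv l ih =>
    rw [List.map_cons] at hnd
    obtain ⟨hk0, hnd'⟩ := List.nodup_cons.mp hnd
    rw [PySem.Dict.get?_mk_cons]
    by_cases hk : kv.1 = k0
    · have htail : ∀ x ∈ l, p x = q x := by
        intro x hx
        refine hag x ?_
        intro hx1
        have hmem : x.1 ∈ l.map Prod.fst := List.mem_map_of_mem hx
        rw [hx1, ← hk] at hmem
        exact hk0 hmem
      have hcp : l.countP p = l.countP q := List.countP_congr (fun x hx => by rw [htail x hx])
      obtain ⟨k1, v1⟩ := kv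
      simp only at hk
      subst hk
      simp only [beq_self_eq_true, if_pos]
      rw [List.countP_cons, List.countP_cons, hcp]
      push_cast
      split_ifs <;> simp_all
    · rw [if_neg (by simpa using hk)]
      rw [List.countP_cons, List.countP_cons, hag kv hk]
      push_cast
      rw [ih hnd']
      split_ifs <;> omega

-- A's scan of `want` succeeds iff no wanted item is unsatisfied
lemma sat_iff (want : List String) (nd : PySem.Dict String Int) (discount : List String) (t : Nat)
    (hnd : nd.keys.Nodup) (hkeys : ∀ k ∈ nd.keys, k ∈ want) :
    (want.all (fun k => !decide (nd.getD k 0 - winCnt discount t k > 0)) = true) ↔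
      nd.items.countP (fun kv => decide (winCnt discount t kv.1 < kv.2)) = 0 := by
  rw [List.all_eq_true, List.countP_eq_zero]
  constructor
  · intro hall kv hkv
    have hk : kv.1 ∈ nd.keys := PySem.Dict.mem_keys_of_mem_items _ hkv
    have hv : nd.getD kv.1 0 = kv.2 := PySem.Dict.getD_of_mem_items _ hkv hnd 0
    have := hall kv.1 (hkeys _ hk)
    simp only [Bool.not_eq_eq_eq_not, Bool.not_true, decide_eq_false_iff_not, not_lt,
      decide_eq_true_eq] at this ⊢
    omega
  · intro hitems k hk
    simp only [Bool.not_eq_eq_eq_not, Bool.not_true, decide_eq_false_iff_not, not_lt]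
    rcases hget : nd.get? k with _ | v
    · rw [PySem.Dict.getD_of_get?_eq_none _ 0 hget]
      have := winCnt_nonneg discount t k
      omega
    · have hmem := PySem.Dict.mem_items_of_get?_eq_some _ hget
      have h2 : ¬ (winCnt discount t k < v) := by simpa using hitems (k, v) hmem
      rw [PySem.Dict.getD_of_get?_eq_some _ 0 hget]
      omega

-- the combined loop invariant: A's fruits is need minus the window count, B's cnt is the window
-- count, B's unsat counts the unsatisfied entries of need, and the two answers stay equal
set_option maxHeartbeats 1600000 in
lemma loop_inv (want : List String) (nd : PySem.Dict String Int) (discount : List String)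
    (hnd : nd.keys.Nodup) (hkeys : ∀ k ∈ nd.keys, k ∈ want)
    (F0 C0 : PySem.Dict String Int) (u0 aA aB : Int)
    (hF0 : ∀ k, F0.getD k 0 = nd.getD k 0 - winCnt discount 0 k)
    (hC0 : ∀ k, C0.getD k 0 = winCnt discount 0 k)
    (hu0 : u0 = (nd.items.countP (fun kv => decide (winCnt discount 0 kv.1 < kv.2)) : Int))
    (hab : aA = aB)
    (t : Nat) (ht : t ≤ discount.length - 10) :
    (∀ k, ((List.range t).foldl (solutionWhileStep want discount) (F0, aA)).1.getD k 0
        = nd.getD k 0 - winCnt discount t k) ∧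
    (∀ k, ((List.range t).foldl (solutionAltStep nd discount) ((C0, u0), aB)).1.1.getD k 0
        = winCnt discount t k) ∧
    (((List.range t).foldl (solutionAltStep nd discount) ((C0, u0), aB)).1.2
        = (nd.items.countP (fun kv => decide (winCnt discount t kv.1 < kv.2)) : Int)) ∧
    (((List.range t).foldl (solutionWhileStep want discount) (F0, aA)).2
        = ((List.range t).foldl (solutionAltStep nd discount) ((C0, u0), aB)).2) := by
  induction t with
  | zero => simpa using ⟨hF0, hC0, hu0, hab⟩
  | succ t ih =>
    have ht' : t ≤ discount.length - 10 := by omega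
    have htl : t + 10 < discount.length := by omega
    obtain ⟨iF, iC, iu, ia⟩ := ih ht'
    simp only [List.range_succ, List.foldl_append, List.foldl_cons, List.foldl_nil]
    set A := (List.range t).foldl (solutionWhileStep want discount) (F0, aA) with hA
    set B := (List.range t).foldl (solutionAltStep nd discount) ((C0, u0), aB) with hB
    set out := discount.getD t "" with hout
    set inn := discount.getD (t + 10) "" with hinn
    -- the updated fruits dict of A
    have hF' : ∀ k, (solutionWhileStep want discount A t).1.getD k 0
        = nd.getD k 0 - winCnt discount (t + 1) k := by
      intro k
      simp only [solutionWhileStep]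
      simp only [PySem.Dict.getD_modify, iF]
      rw [winCnt_succ discount t htl k, ← hout, ← hinn]
      clear ih hA hB iu ia hab hu0 hF0 hC0 iC iF
      by_cases h1 : k = inn <;> by_cases h2 : k = out <;> by_cases h3 : inn = out <;>
        simp_all <;> omega
    -- the updated window-count dict of B
    have hC' : ∀ k, (solutionAltStep nd discount B t).1.1.getD k 0 = winCnt discount (t + 1) k := by
      intro k
      simp only [solutionAltStep, solutionAltShift, List.foldl_cons, List.foldl_nil]
      simp only [PySem.Dict.getD_insert, iC]
      rw [winCnt_succ discount t htl k, ← hout, ← hinn]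
      clear ih hA hB iu ia hab hu0 hF0 hC0 iF hF'
      by_cases h1 : k = inn <;> by_cases h2 : k = out <;> by_cases h3 : inn = out <;>
        simp_all <;> omega
    -- the updated unsatisfied-count of B
    have hu' : (solutionAltStep nd discount B t).1.2
        = ((nd.items.countP (fun kv => decide (winCnt discount (t + 1) kv.1 < kv.2)) : Int)) := by
      have hndl : (nd.items.map Prod.fst).Nodup := hnd
      have hδ1 := countP_delta nd.items hndl
        (fun kv => decide (winCnt discount t kv.1 < kv.2))
        (fun kv => decide (winCnt discount t kv.1 - (if kv.1 = out then 1 else 0) < kv.2))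
        out (by
          intro kv hkv
          simp only [if_neg hkv, sub_zero])
      have hδ2 := countP_delta nd.items hndl
        (fun kv => decide (winCnt discount t kv.1 - (if kv.1 = out then 1 else 0) < kv.2))
        (fun kv => decide (winCnt discount (t + 1) kv.1 < kv.2))
        inn (by
          intro kv hkv
          simp only [winCnt_succ discount t htl kv.1, ← hout, ← hinn, if_neg hkv, add_zero])
      have hmk : PySem.Dict.mk nd.items = nd := rfl
      rw [hmk] at hδ1 hδ2
      simp only [solutionAltStep, solutionAltShift, List.foldl_cons, List.foldl_nil]
      rw [← hout, ← hinn]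
      simp only [PySem.Dict.getD_insert, iC, iu]
      by_cases hio : inn = out
      · rw [hio] at hδ2 ⊢
        have hww : winCnt discount (t + 1) out = winCnt discount t out := by
          rw [winCnt_succ discount t htl out, ← hout, ← hinn, hio]
          simp
        rcases hgo : nd.get? out with _ | vout <;>
          simp only [hgo, PySem.Dict.contains_eq_isSome_get?, PySem.Dict.getD_eq_get?_getD,
            Option.isSome_none, Option.isSome_some, Option.getD_some, Option.getD_none,
            decide_eq_true_eq, add_zero, Bool.false_eq_true, if_false] at hδ1 hδ2 ⊢ <;>
          rw [hδ2, hδ1] <;> clear hδ1 hδ2 <;> try rw [hww]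
        all_goals split_ifs <;> first | omega | (push_cast; ring_nf)
      · simp only [if_neg hio]
        have hw1 : winCnt discount (t + 1) out = winCnt discount t out - 1 := by
          rw [winCnt_succ discount t htl out, ← hout, ← hinn, if_pos rfl, if_neg (fun h => hio h.symm)]
          ring
        have hw2 : winCnt discount (t + 1) inn = winCnt discount t inn + 1 := by
          rw [winCnt_succ discount t htl inn, ← hout, ← hinn, if_neg hio, if_pos rfl]
          ring
        rcases hgo : nd.get? out with _ | vout <;> rcases hgi : nd.get? inn with _ | vin <;>
          simp only [hgo, hgi, PySem.Dict.contains_eq_isSome_get?, PySem.Dict.getD_eq_get?_getD,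
            Option.isSome_none, Option.isSome_some, Option.getD_some, Option.getD_none,
            decide_eq_true_eq, add_zero, Bool.false_eq_true, if_false] at hδ1 hδ2 ⊢ <;>
          rw [hδ2, hδ1] <;> clear hδ1 hδ2 <;> try simp only [hw2, if_neg hio]
        all_goals split_ifs <;> first | omega | (push_cast; ring_nf)
    -- the two answers after the step
    have hans : (solutionWhileStep want discount A t).2 = (solutionAltStep nd discount B t).2 := by
      have hansA : (solutionWhileStep want discount A t).2
          = if want.all (fun k => !decide ((solutionWhileStep want discount A t).1.getD k 0 > 0))
            then A.2 + 1 else A.2 := rfl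
      have hansB : (solutionAltStep nd discount B t).2
          = if (solutionAltStep nd discount B t).1.2 = 0 then B.2 + 1 else B.2 := rfl
      have hcond : (want.all (fun k => !decide ((solutionWhileStep want discount A t).1.getD k 0 > 0)) = true)
          ↔ ((solutionAltStep nd discount B t).1.2 = 0) := by
        rw [show (fun k => !decide ((solutionWhileStep want discount A t).1.getD k 0 > 0))
            = (fun k => !decide (nd.getD k 0 - winCnt discount (t + 1) k > 0))
          from funext fun k => by rw [hF' k]]
        rw [hu']
        exact (sat_iff want nd discount (t + 1) hnd hkeys).trans (by exact_mod_cast Iff.rfl)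
      rw [hansA, hansB, ia]
      by_cases hc : want.all (fun k => !decide ((solutionWhileStep want discount A t).1.getD k 0 > 0)) = true
      · rw [if_pos hc, if_pos (hcond.mp hc)]
      · rw [if_neg hc, if_neg (fun h => hc (hcond.mpr h))]
    exact ⟨hF', hC', hu', hans⟩

-- ===== VERDICT (by name: the statement is the Claim_ definition above) =====
set_option maxHeartbeats 1000000 in
theorem solution_spec : Claim_equal_solution := by
  intro want number discount _
  unfold Spec_solution solution solution_alt
  rw [PySem.List.slice_to discount (by norm_num : (0:Int) ≤ 10)]
  have h10 : ((10:Int)).toNat = 10 := rfl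
  rw [h10]
  rw [show (want.zip number).foldl (fun d wn => d.insert wn.1 wn.2) PySem.Dict.empty = needOf want number from rfl]
  have hnodup := needOf_keys_nodup want number
  have hsub := needOf_keys_sub want number
  have hF0 : ∀ k, ((discount.take 10).foldl (fun d f => d.modify f 0 (fun v => v - 1)) (needOf want number)).getD k 0
      = (needOf want number).getD k 0 - winCnt discount 0 k := by
    intro k
    rw [getD_foldl_modify_sub_one]
    simp [winCnt]
  have hC0 : ∀ k, ((discount.take 10).foldl (fun d f => d.insert f (d.getD f 0 + 1)) PySem.Dict.empty).getD k 0
      = winCnt discount 0 k := by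
    intro k
    rw [PySem.Dict.getD_foldl_insert_add_one]
    simp [winCnt]
  have hu0 : ((needOf want number).items.foldl
        (fun a kv => if ((discount.take 10).foldl (fun d f => d.insert f (d.getD f 0 + 1)) PySem.Dict.empty).getD kv.1 0 < kv.2 then a + 1 else a) (0:Int))
      = ((needOf want number).items.countP (fun kv => decide (winCnt discount 0 kv.1 < kv.2)) : Int) := by
    rw [foldl_unsat_eq_countP _ (fun k => ((discount.take 10).foldl (fun d f => d.insert f (d.getD f 0 + 1)) PySem.Dict.empty).getD k 0), zero_add]
    congr 1
    apply List.countP_congr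
    intro kv _
    simp [hC0 kv.1]
  have hab : (if want.all (fun k => !decide (((discount.take 10).foldl (fun d f => d.modify f 0 (fun v => v - 1)) (needOf want number)).getD k 0 > 0)) then (1:Int) else 0)
      = (if ((needOf want number).items.foldl
            (fun (a : Int) (kv : String × Int) => if ((discount.take 10).foldl (fun d f => d.insert f (d.getD f 0 + 1)) PySem.Dict.empty).getD kv.1 0 < kv.2 then a + 1 else a) (0:Int)) = 0 then (1:Int) else 0) := by
    have h1 : (want.all (fun k => !decide (((discount.take 10).foldl (fun d f => d.modify f 0 (fun v => v - 1)) (needOf want number)).getD k 0 > 0)))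
        = (want.all (fun k => !decide ((needOf want number).getD k 0 - winCnt discount 0 k > 0))) := by
      congr 1; funext k; rw [hF0 k]
    rw [h1, hu0]
    by_cases hs : (want.all (fun k => !decide ((needOf want number).getD k 0 - winCnt discount 0 k > 0)) = true)
    · rw [if_pos hs, if_pos]
      exact_mod_cast congrArg Nat.cast ((sat_iff want (needOf want number) discount 0 hnodup hsub).mp hs)
    · rw [if_neg hs, if_neg]
      intro hc
      exact hs ((sat_iff want (needOf want number) discount 0 hnodup hsub).mpr (by exact_mod_cast hc))
  exact (loop_inv want (needOf want number) discount hnodup hsub _ _ _ _ _ hF0 hC0 hu0 hab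
    (discount.length - 10) le_rfl).2.2.2
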